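-- pv_equiv track=rewrite | github.com/0xnicholasy/Music-Telegram-Bot | utils.py | format_to_markdown_v2
-- ===== SOURCE A (Python) =====
-- def format_to_markdown_v2(text: str):
--     replacing_dict = {
--         "\`": "`",
--         "\*\*": "*",
--     }
--     for key in replacing_dict:
--         text = text.replace(key, replacing_dict[key])
--
--     # Split the text into lines
--     lines = text.split("\n")
--
--     # Process each line
--     formatted_lines = []
--     for line in lines:
--         # Check if the line starts with "##" or "###"
--         if line.startswith("##") or line.startswith("###"):
--             # Remove the "##" or "###" and strip any leading or trailing spaces
--             new_line = line.lstrip("#").strip()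
--             # Add '*' at the beginning and end of the line
--             new_line = f"*{new_line}*"
--             formatted_lines.append(new_line)
--         else:
--             # If no need to change, keep the line as it is
--             formatted_lines.append(line)
--
--     # Join the formatted lines back into a single text string
--     formatted_text = "\n".join(formatted_lines)
--
--     return formatted_text
-- ===== SOURCE B (Python) =====
-- def _fmt(line):
--     if line.startswith("##"):
--         return "*" + line.lstrip("#").strip() + "*"
--     return line
--
--
-- def format_to_markdown_v2(text: str):
--     text = text.replace("\\`", "`").replace("\\*\\*", "*")
--     out = []
--     cur = []
--     for ch in text:
--         if ch == "\n":
--             out.append(_fmt("".join(cur)))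
--             out.append("\n")
--             cur = []
--         else:
--             cur.append(ch)
--     out.append(_fmt("".join(cur)))
--     return "".join(out)
-- ===== Notes on version B (the rewrite author's own statement) =====
-- stated objective: alternative
-- what changed: Replaced split-into-lines / transform-list / join-with-newline with a single character-level pass that accumulates the current line and emits each (transformed) line as its newline is reached, never materialising the list of lines; the redundant second startswith header check (subsumed by the first) is dropped.
import Mathlib
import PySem

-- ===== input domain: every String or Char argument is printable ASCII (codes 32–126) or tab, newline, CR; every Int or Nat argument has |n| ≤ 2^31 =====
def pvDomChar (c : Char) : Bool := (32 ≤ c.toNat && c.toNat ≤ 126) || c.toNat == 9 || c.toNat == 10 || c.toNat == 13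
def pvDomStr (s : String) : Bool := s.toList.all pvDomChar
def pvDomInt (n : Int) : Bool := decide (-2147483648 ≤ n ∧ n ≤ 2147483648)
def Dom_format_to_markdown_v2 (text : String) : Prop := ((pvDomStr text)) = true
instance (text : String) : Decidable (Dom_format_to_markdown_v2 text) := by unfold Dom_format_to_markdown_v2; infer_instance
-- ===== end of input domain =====

-- B replaces A's split-lines / map / join-with-"\n" pipeline by a single character-level
-- pass that emits each (transformed) line as its terminating newline is reached (alternative, same O(n)).


-- ===== PORT A =====
-- the per-line transform of A's loop body: startswith "##"/"###", lstrip("#") (= dropWhile '#',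
-- exact since the argument is the single char '#'), strip(), wrap in '*'
def pvFmtA (line : List Char) : List Char :=
  if PySem.Chars.startswith line "##".toList || PySem.Chars.startswith line "###".toList then
    '*' :: (PySem.Chars.strip (line.dropWhile (· == '#')) ++ ['*'])
  else line

-- the two dict-driven replaces in insertion order, then lines = t.split("\n") (sep ≠ "",
-- so Chars.splitOn is exact), the per-line loop, then "\n".join(...)
def format_to_markdown_v2 (text : String) : String :=
  String.ofList (PySem.Chars.join ['\n']
    ((PySem.Chars.splitOn
        (PySem.Str.replace (PySem.Str.replace text "\\`" "`") "\\*\\*" "*").toList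
        ['\n']).map pvFmtA))

-- ===== PORT B =====
def pvFmtB (line : List Char) : List Char :=
  if PySem.Chars.startswith line "##".toList then
    '*' :: (PySem.Chars.strip (line.dropWhile (· == '#')) ++ ['*'])
  else line

-- the single pass: cur is the reversed current line, flushed at '\n' and at the end
def pvGoB (cs : List Char) (cur : List Char) : List Char :=
  match cs with
  | [] => pvFmtB cur.reverse
  | c :: rest =>
    if c = '\n' then pvFmtB cur.reverse ++ '\n' :: pvGoB rest []
    else pvGoB rest (c :: cur)

def format_to_markdown_v2_alt (text : String) : String :=
  String.ofList
    (pvGoB (PySem.Str.replace (PySem.Str.replace text "\\`" "`") "\\*\\*" "*").toList [])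

-- ===== PRECONDITION & SPEC =====
def Spec_format_to_markdown_v2 (text : String) (out : String) : Prop := out = format_to_markdown_v2_alt text
instance (text : String) (out : String) : Decidable (Spec_format_to_markdown_v2 text out) := by unfold Spec_format_to_markdown_v2; infer_instance

-- ===== CLAIM (what is proved, stated in full; the proofs are below) =====
def Claim_equal_format_to_markdown_v2 : Prop := ∀ (text : String), Dom_format_to_markdown_v2 text → Spec_format_to_markdown_v2 text (format_to_markdown_v2 text)

-- ===== LEMMAS AND PROOFS =====

-- reference single-pass splitter: splitAux l cur = (cur.reverse-prefixed) split of l on '\n'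
def pvSplitAux (l : List Char) (cur : List Char) : List (List Char) :=
  match l with
  | [] => [cur.reverse]
  | c :: rest => if c = '\n' then cur.reverse :: pvSplitAux rest [] else pvSplitAux rest (c :: cur)

theorem pvSplitAux_ne_nil (l cur : List Char) : pvSplitAux l cur ≠ [] := by
  induction l generalizing cur with
  | nil => simp [pvSplitAux]
  | cons c rest ih =>
    simp only [pvSplitAux]
    split <;> simp [ih]

theorem pvGo_eq (fuel : Nat) : ∀ (l cur : List Char) (acc : List (List Char)),
    l.length < fuel →
    PySem.Chars.splitOn.go ['\n'] fuel l cur acc = acc.reverse ++ pvSplitAux l cur := by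
  induction fuel with
  | zero => intro l cur acc h; omega
  | succ fuel ih =>
    intro l cur acc h
    match l with
    | [] => simp [PySem.Chars.splitOn.go, pvSplitAux]
    | c :: rest =>
      simp only [PySem.Chars.splitOn.go, pvSplitAux]
      by_cases hc : c = '\n'
      · subst hc
        have hp : List.isPrefixOf ['\n'] ('\n' :: rest) = true := by simp [List.isPrefixOf]
        rw [hp]
        simp only [if_true, List.length_nil, List.length_cons, List.drop_succ_cons, List.drop]
        rw [ih rest [] (cur.reverse :: acc) (by simp at h; omega)]
        simp
      · have hp : List.isPrefixOf ['\n'] (c :: rest) = false := by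
          simp [List.isPrefixOf]
          exact fun hh => absurd hh.symm hc
        rw [hp]
        simp only [Bool.false_eq_true, if_neg hc]
        exact ih rest (c :: cur) acc (by simp at h ⊢; omega)

theorem pvSplitOn_eq (cs : List Char) :
    PySem.Chars.splitOn cs ['\n'] = pvSplitAux cs [] := by
  unfold PySem.Chars.splitOn
  rw [pvGo_eq (cs.length + 1) cs [] [] (by omega)]
  simp

theorem pvFmt_eq (l : List Char) : pvFmtA l = pvFmtB l := by
  unfold pvFmtA pvFmtB
  have e2 : "##".toList = ['#', '#'] := rfl
  have e3 : "###".toList = ['#', '#', '#'] := rfl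
  rw [e2, e3]
  by_cases h2 : PySem.Chars.startswith l ['#', '#'] = true
  · simp [h2]
  · have h3 : PySem.Chars.startswith l ['#', '#', '#'] = false := by
      by_contra hne
      have h3' : ['#', '#', '#'] <+: l := (PySem.Chars.startswith_iff _ _).mp
        (by revert hne; cases PySem.Chars.startswith l ['#', '#', '#'] <;> simp)
      exact h2 ((PySem.Chars.startswith_iff _ _).mpr (List.IsPrefix.trans (by decide) h3'))
    have h2' : PySem.Chars.startswith l ['#', '#'] = false := by simpa using h2
    simp [h2', h3]

theorem pvGoB_eq (cs : List Char) : ∀ cur,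
    pvGoB cs cur = PySem.Chars.join ['\n'] ((pvSplitAux cs cur).map pvFmtB) := by
  induction cs with
  | nil => intro cur; simp [pvGoB, pvSplitAux, PySem.Chars.join_singleton]
  | cons c rest ih =>
    intro cur
    simp only [pvGoB, pvSplitAux]
    by_cases hc : c = '\n'
    · simp only [if_pos hc]
      obtain ⟨a, t, hat⟩ : ∃ a t, pvSplitAux rest [] = a :: t := by
        cases hs : pvSplitAux rest [] with
        | nil => exact absurd hs (pvSplitAux_ne_nil rest [])
        | cons a t => exact ⟨a, t, rfl⟩
      rw [ih [], hat]
      simp [PySem.Chars.join_cons_cons]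
    · simp only [if_neg hc]
      exact ih (c :: cur)

-- ===== VERDICT (by name: the statement is the Claim_ definition above) =====
theorem format_to_markdown_v2_spec : Claim_equal_format_to_markdown_v2 := by
  intro text _
  unfold Spec_format_to_markdown_v2 format_to_markdown_v2 format_to_markdown_v2_alt
  rw [pvSplitOn_eq, pvGoB_eq]
  rw [funext pvFmt_eq]
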